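-- pv_equiv track=rewrite | github.com/npalomin/map-sbb | python/osm_utils.py | aggregate_tag_data
-- ===== SOURCE A (Python) =====
-- def aggregate_tag_data(tags):
--     tag_data = {}
--     for tag in tags:
--         for key in tag.keys():
--             if key not in tag_data.keys():
--                 tag_data[key] = {}
--
--             value = tag[key]
--             value = value.strip().replace(" ", "_").lower()
--
--             if value not in tag_data[key].keys():
--                 tag_data[key][value] = 1
--             else:
--                 tag_data[key][value] += 1
--     return tag_data
-- ===== SOURCE B (Python) =====
-- def aggregate_tag_data(tags):
--     # Pass 1: flatten all tag entries into one flat counter keyed by (key, normalized value).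
--     counts = {}
--     for tag in tags:
--         for key, raw in tag.items():
--             pair = (key, raw.strip().replace(" ", "_").lower())
--             counts[pair] = counts.get(pair, 0) + 1
--     # Pass 2: regroup the flat counter into the nested per-key dict.
--     tag_data = {}
--     for (key, value), n in counts.items():
--         if key not in tag_data:
--             tag_data[key] = {}
--         tag_data[key][value] = n
--     return tag_data
-- ===== Notes on version B (the rewrite author's own statement) =====
-- stated objective: alternative
-- what changed: A interleaves membership checks and increments on the nested per-key dicts while scanning; B first flattens all tag entries into one flat counter keyed by (key, normalized value) tuples and then regroups the counter's items into the nested dict in a second, differently-shaped pass.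
import Mathlib
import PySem

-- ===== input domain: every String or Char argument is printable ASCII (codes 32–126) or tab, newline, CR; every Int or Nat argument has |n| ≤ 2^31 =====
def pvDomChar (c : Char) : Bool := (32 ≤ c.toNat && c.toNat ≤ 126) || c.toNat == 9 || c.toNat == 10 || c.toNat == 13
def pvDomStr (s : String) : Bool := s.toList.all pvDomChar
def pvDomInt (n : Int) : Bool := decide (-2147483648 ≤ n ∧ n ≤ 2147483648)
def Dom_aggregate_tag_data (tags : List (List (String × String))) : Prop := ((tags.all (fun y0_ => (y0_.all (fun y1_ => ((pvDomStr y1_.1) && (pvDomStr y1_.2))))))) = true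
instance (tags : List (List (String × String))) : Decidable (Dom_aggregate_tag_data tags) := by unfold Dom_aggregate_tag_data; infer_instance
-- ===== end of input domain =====

-- B replaces A's interleaved membership-check-and-increment over nested dicts by a flat counter over
-- (key, normalized value) pairs followed by a regrouping pass (objective: alternative decomposition).

-- ===== PORT A =====
-- value.strip().replace(" ", "_").lower()  (shared by both ports: both Pythons normalize identically)
def pvNorm (s : String) : String :=
  PySem.Str.lower (PySem.Str.replace (PySem.Str.strip s) " " "_")

-- A's loop body for one (key, value) with value already normalized: the key-membership check,
-- then the value-membership check and increment.
def pvStepA' (td : PySem.Dict String (PySem.Dict String Int)) (e : String × String) :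
    PySem.Dict String (PySem.Dict String Int) :=
  let td := if td.contains e.1 then td else td.insert e.1 PySem.Dict.empty
  let inner := td.getD e.1 PySem.Dict.empty
  if inner.contains e.2 then td.insert e.1 (inner.insert e.2 (inner.getD e.2 0 + 1))
  else td.insert e.1 (inner.insert e.2 1)

def aggregate_tag_data (tags : List (List (String × String))) : List (String × List (String × Int)) :=
  let tag_data := tags.foldl (fun td tag =>
      (PySem.Dict.ofList tag).items.foldl (fun td p => pvStepA' td (p.1, pvNorm p.2)) td)
    PySem.Dict.empty
  tag_data.items.map (fun p => (p.1, p.2.items))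

-- ===== PORT B =====
-- B's pass-1 step: counts[pair] = counts.get(pair, 0) + 1.
def pvBumpC (c : PySem.Dict (String × String) Int) (e : String × String) :
    PySem.Dict (String × String) Int :=
  c.insert e (c.getD e 0 + 1)

-- B's second pass: distribute one ((key, value), count) item of the flat counter into the nested dict.
def pvStepB (td : PySem.Dict String (PySem.Dict String Int)) (q : (String × String) × Int) :
    PySem.Dict String (PySem.Dict String Int) :=
  let td := if td.contains q.1.1 then td else td.insert q.1.1 PySem.Dict.empty
  td.insert q.1.1 ((td.getD q.1.1 PySem.Dict.empty).insert q.1.2 q.2)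

def aggregate_tag_data_alt (tags : List (List (String × String))) : List (String × List (String × Int)) :=
  -- pass 1: counts[pair] = counts.get(pair, 0) + 1 over all tag entries
  let counts := tags.foldl (fun c tag =>
      (PySem.Dict.ofList tag).items.foldl (fun c p => pvBumpC c (p.1, pvNorm p.2)) c)
    PySem.Dict.empty
  -- pass 2: regroup the flat counter into the nested dict
  let tag_data := counts.items.foldl pvStepB PySem.Dict.empty
  tag_data.items.map (fun p => (p.1, p.2.items))

-- ===== PRECONDITION & SPEC =====
def Spec_aggregate_tag_data (tags : List (List (String × String))) (out : List (String × List (String × Int))) : Prop := out = aggregate_tag_data_alt tags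
instance (tags : List (List (String × String))) (out : List (String × List (String × Int))) : Decidable (Spec_aggregate_tag_data tags out) := by unfold Spec_aggregate_tag_data; infer_instance

-- ===== CLAIM (what is proved, stated in full; the proofs are below) =====
def Claim_equal_aggregate_tag_data : Prop := ∀ (tags : List (List (String × String))), Dom_aggregate_tag_data tags → Spec_aggregate_tag_data tags (aggregate_tag_data tags)

-- ===== LEMMAS AND PROOFS =====

-- The flat stream of normalized (key, value) entries both programs iterate over.
def pvEntries (tags : List (List (String × String))) : List (String × String) :=
  tags.flatMap (fun tag => (PySem.Dict.ofList tag).items.map (fun p => (p.1, pvNorm p.2)))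

-- List-level model of bumping the count of e in a counter's items (first occurrence; append 1 if absent).
def pvBumpItems : List ((String × String) × Int) → (String × String) → List ((String × String) × Int)
  | [], e => [(e, 1)]
  | (p, n) :: c, e => if p = e then (p, n + 1) :: c else (p, n) :: pvBumpItems c e

-- "td already records the pair (k, v)".
def pvHasPair (td : PySem.Dict String (PySem.Dict String Int)) (k v : String) : Bool :=
  td.contains k && (td.getD k PySem.Dict.empty).contains v

-- A's step on a pair already present = bump the inner count in place.
def pvBump (td : PySem.Dict String (PySem.Dict String Int)) (k v : String) :
    PySem.Dict String (PySem.Dict String Int) :=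
  td.insert k ((td.getD k PySem.Dict.empty).insert v
    ((td.getD k PySem.Dict.empty).getD v 0 + 1))

-- Both nested loops are one fold over the flat entry stream.
theorem pv_fold_entries {α : Type} (f : α → (String × String) → α) (tags : List (List (String × String))) (init : α) :
    tags.foldl (fun a tag => (PySem.Dict.ofList tag).items.foldl (fun a p => f a (p.1, pvNorm p.2)) a) init
      = (pvEntries tags).foldl f init := by
  induction tags generalizing init with
  | nil => rfl
  | cons t ts ih =>
    simp only [pvEntries, List.flatMap_cons, List.foldl_cons, List.foldl_append, List.foldl_map]
    exact ih _

-- Generic two-insert commutation: an in-place overwrite at an existing key commutes with any other insert.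
theorem pv_insert_comm {κ ν : Type} [BEq κ] [LawfulBEq κ] (d : PySem.Dict κ ν) (k k2 : κ) (a b : ν)
    (h : d.contains k = true) (hne : k2 ≠ k) :
    (d.insert k a).insert k2 b = (d.insert k2 b).insert k a := by
  apply PySem.Dict.ext
  have hck2a : (d.insert k a).contains k2 = d.contains k2 := by
    rw [PySem.Dict.contains_insert]; simp [hne]
  have hckb : (d.insert k2 b).contains k = true := by
    rw [PySem.Dict.contains_insert]; simp [h]
  by_cases hc2 : d.contains k2 = true
  · rw [PySem.Dict.items_insert_of_contains _ b (by rw [hck2a]; exact hc2),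
        PySem.Dict.items_insert_of_contains _ a h,
        PySem.Dict.items_insert_of_contains _ a hckb,
        PySem.Dict.items_insert_of_contains _ b hc2]
    rw [List.map_map, List.map_map]
    apply List.map_congr_left
    intro p _
    by_cases h1 : p.1 = k <;> by_cases h2 : p.1 = k2 <;>
      simp [Function.comp, h1, h2, hne, Ne.symm hne]
  · have hc2' : d.contains k2 = false := by simpa using hc2
    rw [PySem.Dict.items_insert_of_not_contains _ b (by rw [hck2a]; exact hc2'),
        PySem.Dict.items_insert_of_contains _ a h,
        PySem.Dict.items_insert_of_contains _ a hckb,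
        PySem.Dict.items_insert_of_not_contains _ b hc2']
    rw [List.map_append]
    simp [hne]

-- pvBumpItems bumps past a prefix of other keys / appends when the key is absent.
theorem pv_bumpItems_append_ne (l1 l2 : List ((String × String) × Int)) (e : String × String)
    (n : Int) (h : ∀ q ∈ l1, q.1 ≠ e) :
    pvBumpItems (l1 ++ (e, n) :: l2) e = l1 ++ (e, n + 1) :: l2 := by
  induction l1 with
  | nil => simp [pvBumpItems]
  | cons q l1 ih =>
    obtain ⟨p, m⟩ := q
    have hp : p ≠ e := h (p, m) (by simp)
    simp only [List.cons_append, pvBumpItems, if_neg hp]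
    rw [ih (fun q hq => h q (by simp [hq]))]

theorem pv_bumpItems_of_forall_ne (c : List ((String × String) × Int)) (e : String × String)
    (h : ∀ q ∈ c, q.1 ≠ e) : pvBumpItems c e = c ++ [(e, 1)] := by
  induction c with
  | nil => rfl
  | cons q c ih =>
    obtain ⟨p, m⟩ := q
    have hp : p ≠ e := h (p, m) (by simp)
    simp only [pvBumpItems, if_neg hp, List.cons_append]
    rw [ih (fun q hq => h q (by simp [hq]))]

-- B's pass-1 step, on the items level (needs unique keys).
theorem pv_items_bumpC (d : PySem.Dict (String × String) Int) (e : String × String)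
    (hnd : d.keys.Nodup) : (pvBumpC d e).items = pvBumpItems d.items e := by
  unfold pvBumpC
  by_cases hc : d.contains e = true
  · have he : e ∈ d.items.map (·.1) := (PySem.Dict.contains_iff_mem_keys d e).1 hc
    obtain ⟨q, hq, hq1⟩ := List.mem_map.1 he
    obtain ⟨l1, l2, hsplit⟩ := List.append_of_mem hq
    have hqe : q = (e, q.2) := by cases q; simp_all
    have hmem : (e, q.2) ∈ d.items := hqe ▸ hq
    have hgd : d.getD e 0 = q.2 := PySem.Dict.getD_of_mem_items d hmem hnd 0
    have hnd' : e ∉ l1.map (·.1) ++ l2.map (·.1) := by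
      have : d.keys = l1.map (·.1) ++ q.1 :: l2.map (·.1) := by
        show d.items.map (·.1) = _
        rw [hsplit]; simp
      rw [this, hq1] at hnd
      have := List.nodup_middle.1 (by simpa using hnd)
      exact (List.nodup_cons.1 this).1
    rw [List.mem_append] at hnd'
    push Not at hnd'
    have hl1 : ∀ p ∈ l1, p.1 ≠ e := by
      intro p hp hpe; exact hnd'.1 (List.mem_map.2 ⟨p, hp, hpe⟩)
    have hl2 : ∀ p ∈ l2, p.1 ≠ e := by
      intro p hp hpe; exact hnd'.2 (List.mem_map.2 ⟨p, hp, hpe⟩)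
    rw [PySem.Dict.items_insert_of_contains _ _ hc, hgd, hsplit, hqe]
    rw [List.map_append, List.map_cons]
    rw [pv_bumpItems_append_ne l1 l2 e q.2 hl1]
    congr 1
    · calc List.map (fun p => if (p.1 == e) = true then (e, (e, q.2).2 + 1) else p) l1
          = l1.map id := List.map_congr_left (fun p hp => by simp [hl1 p hp])
        _ = l1 := List.map_id _
    · congr 1
      · simp
      · calc List.map (fun p => if (p.1 == e) = true then (e, (e, q.2).2 + 1) else p) l2
            = l2.map id := List.map_congr_left (fun p hp => by simp [hl2 p hp])
          _ = l2 := List.map_id _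
  · have hc' : d.contains e = false := by simpa using hc
    have hne : ∀ p ∈ d.items, p.1 ≠ e := by
      intro p hp hpe
      have hct : d.contains e = true :=
        (PySem.Dict.contains_iff_mem_keys d e).2 (List.mem_map.2 ⟨p, hp, hpe⟩)
      rw [hc'] at hct
      exact Bool.false_ne_true hct
    rw [PySem.Dict.items_insert_of_not_contains _ _ hc',
        PySem.Dict.getD_of_not_contains _ _ hc', pv_bumpItems_of_forall_ne _ _ hne]
    norm_num

-- A's step equals pvStepB with count 1 when the pair is new.
theorem pv_stepA'_new (td : PySem.Dict String (PySem.Dict String Int)) (k v : String)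
    (h : pvHasPair td k v = false) : pvStepA' td (k, v) = pvStepB td ((k, v), 1) := by
  unfold pvHasPair at h
  unfold pvStepA' pvStepB
  cases hck : td.contains k with
  | false =>
    simp only [Bool.false_eq_true, if_false]
    simp [PySem.Dict.getD_insert_self, PySem.Dict.contains_empty]
  | true =>
    simp only [hck, Bool.true_and] at h
    simp [h]

-- A's step equals pvBump when the pair is present.
theorem pv_stepA'_old (td : PySem.Dict String (PySem.Dict String Int)) (k v : String)
    (h : pvHasPair td k v = true) : pvStepA' td (k, v) = pvBump td k v := by
  unfold pvHasPair at h
  rw [Bool.and_eq_true] at h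
  unfold pvStepA' pvBump
  simp only [h.1, if_true]
  simp [h.2]

-- pvStepB preserves presence of a pair.
theorem pv_hasPair_stepB (td : PySem.Dict String (PySem.Dict String Int)) (k v : String)
    (q : (String × String) × Int) (h : pvHasPair td k v = true) :
    pvHasPair (pvStepB td q) k v = true := by
  obtain ⟨⟨k2, v2⟩, m⟩ := q
  unfold pvHasPair at h ⊢
  rw [Bool.and_eq_true] at h
  unfold pvStepB
  by_cases hk : k2 = k
  · subst hk
    simp only [h.1, if_true]
    simp [PySem.Dict.contains_insert_self, PySem.Dict.getD_insert_self,
      PySem.Dict.contains_insert, h.2]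
  · by_cases hc2 : td.contains k2 = true
    · simp only [hc2, if_true]
      simp [PySem.Dict.contains_insert, PySem.Dict.getD_insert_of_ne _ _ _ (Ne.symm hk), h.1, h.2]
    · simp only [hc2]
      simp [PySem.Dict.contains_insert, PySem.Dict.getD_insert_of_ne _ _ _ (Ne.symm hk), h.1, h.2]

-- pvStepB at a different pair preserves absence of a pair.
theorem pv_hasPair_stepB_ne (td : PySem.Dict String (PySem.Dict String Int)) (k v : String)
    (q : (String × String) × Int) (h : pvHasPair td k v = false) (hq : q.1 ≠ (k, v)) :
    pvHasPair (pvStepB td q) k v = false := by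
  obtain ⟨⟨k2, v2⟩, m⟩ := q
  unfold pvHasPair at h ⊢
  unfold pvStepB
  by_cases hk : k2 = k
  · subst hk
    have hv : v2 ≠ v := fun hv => hq (by simp [hv])
    cases hck : td.contains k2 with
    | true =>
      simp only [if_true]
      simp only [hck, Bool.true_and] at h
      simp [PySem.Dict.contains_insert_self, PySem.Dict.getD_insert_self,
        PySem.Dict.contains_insert, h, Ne.symm hv]
    | false =>
      simp only [Bool.false_eq_true, if_false]
      rw [PySem.Dict.insert_insert_self]
      simp [PySem.Dict.contains_insert_self, PySem.Dict.getD_insert_self,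
        PySem.Dict.contains_insert, PySem.Dict.contains_empty, Ne.symm hv]
  · have hbeq : (k == k2) = false := by simp [Ne.symm hk]
    by_cases hc2 : td.contains k2 = true
    · simp only [hc2, if_true]
      simp only [PySem.Dict.contains_insert, PySem.Dict.getD_insert_of_ne _ _ _ (Ne.symm hk),
        hbeq, Bool.false_or]
      exact h
    · simp only [hc2, Bool.false_eq_true, if_false]
      rw [PySem.Dict.insert_insert_self]
      simp only [PySem.Dict.contains_insert, PySem.Dict.getD_insert_of_ne _ _ _ (Ne.symm hk),
        hbeq, Bool.false_or]
      exact h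

-- pvBump commutes with pvStepB at a different pair when (k, v) is present.
theorem pv_bump_stepB_comm (td : PySem.Dict String (PySem.Dict String Int)) (k v : String)
    (q : (String × String) × Int) (h : pvHasPair td k v = true) (hq : q.1 ≠ (k, v)) :
    pvStepB (pvBump td k v) q = pvBump (pvStepB td q) k v := by
  obtain ⟨⟨k2, v2⟩, m⟩ := q
  unfold pvHasPair at h
  rw [Bool.and_eq_true] at h
  obtain ⟨hk1, hv1⟩ := h
  unfold pvStepB pvBump
  by_cases hk : k2 = k
  · subst hk
    have hv : v2 ≠ v := fun hv => hq (by simp [hv])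
    simp only [hk1, if_true, PySem.Dict.contains_insert_self, PySem.Dict.getD_insert_self,
      PySem.Dict.insert_insert_self]
    rw [PySem.Dict.getD_insert_of_ne _ _ _ (Ne.symm hv)]
    rw [pv_insert_comm _ v v2 _ m hv1 hv]
  · have hck2 : ((td.insert k ((td.getD k PySem.Dict.empty).insert v
        ((td.getD k PySem.Dict.empty).getD v 0 + 1))).contains k2) = td.contains k2 := by
      rw [PySem.Dict.contains_insert]; simp [hk]
    by_cases hc2 : td.contains k2 = true
    · simp only [hck2, hc2, if_true]
      rw [PySem.Dict.getD_insert_of_ne _ _ _ hk,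
          PySem.Dict.getD_insert_of_ne _ _ _ (Ne.symm hk)]
      rw [pv_insert_comm td k k2 _ _ hk1 hk]
    · have hc2' : td.contains k2 = false := by simpa using hc2
      simp only [hck2, hc2', Bool.false_eq_true, if_false]
      rw [PySem.Dict.insert_insert_self, PySem.Dict.insert_insert_self]
      rw [PySem.Dict.getD_insert_self, PySem.Dict.getD_insert_self]
      rw [PySem.Dict.getD_insert_of_ne _ _ _ (Ne.symm hk)]
      rw [pv_insert_comm td k k2 _ _ hk1 hk]

theorem pv_coreBump (c : List ((String × String) × Int)) (td : PySem.Dict String (PySem.Dict String Int))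
    (k v : String) (hc : ∀ q ∈ c, q.1 ≠ (k, v)) (h : pvHasPair td k v = true) :
    c.foldl pvStepB (pvBump td k v) = pvStepA' (c.foldl pvStepB td) (k, v) := by
  induction c generalizing td with
  | nil =>
    simp only [List.foldl_nil]
    exact (pv_stepA'_old td k v h).symm
  | cons q c ih =>
    simp only [List.foldl_cons]
    rw [pv_bump_stepB_comm td k v q h (hc q (by simp))]
    exact ih (pvStepB td q) (fun q' hq' => hc q' (by simp [hq'])) (pv_hasPair_stepB td k v q h)

theorem pv_coreT (c : List ((String × String) × Int)) (td : PySem.Dict String (PySem.Dict String Int))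
    (k v : String) (hc : (c.map (·.1)).Nodup) (h : pvHasPair td k v = false) :
    (pvBumpItems c (k, v)).foldl pvStepB td = pvStepA' (c.foldl pvStepB td) (k, v) := by
  induction c generalizing td with
  | nil =>
    simp only [pvBumpItems, List.foldl_cons, List.foldl_nil]
    exact (pv_stepA'_new td k v h).symm
  | cons q c ih =>
    obtain ⟨p, n⟩ := q
    rw [List.map_cons, List.nodup_cons] at hc
    by_cases hp : p = (k, v)
    · subst hp
      simp only [pvBumpItems, if_true, List.foldl_cons]
      have hb : pvStepB td ((k, v), n + 1) = pvBump (pvStepB td ((k, v), n)) k v := by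
        unfold pvStepB pvBump
        simp only [PySem.Dict.getD_insert_self, PySem.Dict.insert_insert_self]
      rw [hb]
      have hfresh : ∀ q ∈ c, q.1 ≠ (k, v) := by
        intro q hq hq1
        exact hc.1 (List.mem_map.2 ⟨q, hq, hq1⟩)
      have hhp : pvHasPair (pvStepB td ((k, v), n)) k v = true := by
        unfold pvStepB pvHasPair
        simp [PySem.Dict.contains_insert_self, PySem.Dict.getD_insert_self]
      exact pv_coreBump c _ k v hfresh hhp
    · simp only [pvBumpItems, if_neg hp, List.foldl_cons]
      exact ih (pvStepB td (p, n)) hc.2 (pv_hasPair_stepB_ne td k v (p, n) h hp)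

-- Main: regrouping the flat counter reproduces A's interleaved fold.
theorem pv_main (es : List (String × String)) :
    ((es.foldl pvBumpC PySem.Dict.empty).items).foldl pvStepB PySem.Dict.empty
      = es.foldl pvStepA' PySem.Dict.empty := by
  induction es using List.reverseRecOn with
  | nil => rfl
  | append_singleton es e ih =>
    obtain ⟨k, v⟩ := e
    have hnd : (es.foldl pvBumpC PySem.Dict.empty).keys.Nodup :=
      PySem.Dict.nodup_keys_foldl_insert es (fun d x => d.getD x 0 + 1) PySem.Dict.empty
        PySem.Dict.nodup_keys_empty
    rw [List.foldl_append, List.foldl_append]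
    simp only [List.foldl_cons, List.foldl_nil]
    rw [pv_items_bumpC _ _ hnd]
    rw [pv_coreT _ _ k v hnd (by unfold pvHasPair; simp [PySem.Dict.contains_empty])]
    rw [ih]

-- ===== VERDICT (by name: the statement is the Claim_ definition above) =====
theorem aggregate_tag_data_spec : Claim_equal_aggregate_tag_data := by
  intro tags _
  show _ = _
  simp only [aggregate_tag_data, aggregate_tag_data_alt, pv_fold_entries pvStepA',
    pv_fold_entries pvBumpC, pv_main]
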